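-- pv_equiv track=rewrite | github.com/tobegold574/Scenic_Area_Impression_Analysis_System | analy/map.py | get_district_statistics
-- ===== SOURCE A (Python) =====
-- def get_district_statistics(attractions) :
--     # 使用字典按区县统计，避免重复的景区名(word)计入
--     district_count = {}
--     for attraction in attractions :
--         district = attraction[ 'districtName' ]
--         word = attraction[ 'word' ]
--         if district not in district_count :
--             district_count[ district ] = set()
--         district_count[ district ].add(word)  # 使用set避免重复的景区名
--     # 计算每个district的景区数量（去重后的数量）
--     return {district : len(words) for district , words in district_count.items()}
-- ===== SOURCE B (Python) =====
-- def get_district_statistics(attractions):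
--     # Two-pass decomposition: first list the districts in first-occurrence order,
--     # then count each district's distinct words with a filtered set comprehension.
--     districts = list(dict.fromkeys(a['districtName'] for a in attractions))
--     return {d: len({a['word'] for a in attractions if a['districtName'] == d})
--             for d in districts}
-- ===== Notes on version B (the rewrite author's own statement) =====
-- stated objective: alternative
-- what changed: Replaces A's single pass that maintains a running dict of per-district word sets by a two-pass scheme: dedup the district names in first-occurrence order, then count each district's distinct words with an independent filtered set comprehension (no running grouping dict).
import Mathlib
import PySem

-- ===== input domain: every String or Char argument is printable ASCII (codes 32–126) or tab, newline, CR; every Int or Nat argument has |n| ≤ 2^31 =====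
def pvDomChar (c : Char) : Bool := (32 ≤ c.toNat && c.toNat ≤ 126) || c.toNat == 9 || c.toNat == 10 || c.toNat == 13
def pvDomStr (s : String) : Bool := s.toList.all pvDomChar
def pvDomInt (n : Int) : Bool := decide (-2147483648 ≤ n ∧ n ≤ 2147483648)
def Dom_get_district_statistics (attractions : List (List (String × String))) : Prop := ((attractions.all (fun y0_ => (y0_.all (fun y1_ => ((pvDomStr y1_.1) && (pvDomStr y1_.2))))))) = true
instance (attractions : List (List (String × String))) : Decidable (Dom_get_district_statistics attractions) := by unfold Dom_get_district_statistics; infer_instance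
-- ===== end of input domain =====

-- B counts per-district distinct words in two passes (dedup districts, then filtered set comprehensions) instead of A's running dict of sets; alternative decomposition, not faster.


-- ===== PORT A =====
-- attraction['k'] : dict lookup; returns "" where Python raises KeyError (excluded by Pre_)
def pvGetKey (a : List (String × String)) (k : String) : String :=
  ((PySem.Dict.mk a).get? k).getD ""

def pvStepA (d : PySem.Dict String (PySem.Set String)) (a : List (String × String)) :
    PySem.Dict String (PySem.Set String) :=
  let district := pvGetKey a "districtName"
  let word := pvGetKey a "word"
  let d1 := if d.contains district then d else d.insert district PySem.Set.empty
  d1.insert district (PySem.Set.add (d1.getD district PySem.Set.empty) word)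

def get_district_statistics (attractions : List (List (String × String))) : List (String × Int) :=
  let district_count := attractions.foldl pvStepA PySem.Dict.empty
  district_count.items.map (fun p => (p.1, (PySem.Set.len p.2 : Int)))

-- ===== PORT B =====
def get_district_statistics_alt (attractions : List (List (String × String))) : List (String × Int) :=
  let districts := PySem.List.dedup (attractions.map (fun a => pvGetKey a "districtName"))
  districts.map (fun d =>
    (d, (PySem.Set.len (PySem.Set.ofList
          ((attractions.filter (fun a => pvGetKey a "districtName" == d)).map
            (fun a => pvGetKey a "word"))) : Int)))

-- ===== PRECONDITION & SPEC =====
-- Pre_ excludes only inputs where some attraction lacks the 'districtName' or 'word' key, on which A raises KeyError.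
def Pre_get_district_statistics (attractions : List (List (String × String))) : Prop :=
  (attractions.all (fun a =>
    (PySem.Dict.mk a).contains "districtName" && (PySem.Dict.mk a).contains "word")) = true
instance (attractions : List (List (String × String))) : Decidable (Pre_get_district_statistics attractions) := by unfold Pre_get_district_statistics; infer_instance

def pvWitness_get_district_statistics : (List (List (String × String))) :=
  [[("districtName", "North"), ("word", "Lake")],
   [("districtName", "North"), ("word", "Lake")],
   [("districtName", "South"), ("word", "Hill")]]

def Spec_get_district_statistics (attractions : List (List (String × String))) (out : List (String × Int)) : Prop := out = get_district_statistics_alt attractions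
instance (attractions : List (List (String × String))) (out : List (String × Int)) : Decidable (Spec_get_district_statistics attractions out) := by unfold Spec_get_district_statistics; infer_instance

-- ===== CLAIM (what is proved, stated in full; the proofs are below) =====
def Claim_equal_get_district_statistics : Prop := ∀ (attractions : List (List (String × String))), Dom_get_district_statistics attractions → Pre_get_district_statistics attractions → Spec_get_district_statistics attractions (get_district_statistics attractions)

-- ===== LEMMAS AND PROOFS =====

-- A's loop body is dict.modify: ensure-empty-then-add equals modify with default empty
theorem pvStepA_eq_modify (d : PySem.Dict String (PySem.Set String)) (a : List (String × String)) :
    pvStepA d a = d.modify (pvGetKey a "districtName") PySem.Set.empty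
      (fun s => PySem.Set.add s (pvGetKey a "word")) := by
  unfold pvStepA PySem.Dict.modify
  by_cases h : d.contains (pvGetKey a "districtName") = true
  · simp [h, PySem.Dict.getD_eq_get?_getD]
  · simp only [Bool.not_eq_true] at h
    simp [h, PySem.Dict.getD_insert_self, PySem.Dict.insert_insert_self,
      PySem.Dict.getD_of_not_contains]

theorem foldl_stepA_eq (l : List (List (String × String)))
    (d : PySem.Dict String (PySem.Set String)) :
    l.foldl pvStepA d = l.foldl (fun d a => d.modify (pvGetKey a "districtName")
      PySem.Set.empty (fun s => PySem.Set.add s (pvGetKey a "word"))) d := by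
  induction l generalizing d with
  | nil => rfl
  | cons a l ih => simp [List.foldl_cons, pvStepA_eq_modify, ih]

theorem getD_foldl_stepA (l : List (List (String × String)))
    (d : PySem.Dict String (PySem.Set String)) (c : String) :
    (l.foldl pvStepA d).getD c PySem.Set.empty
      = PySem.Set.update (d.getD c PySem.Set.empty)
          ((l.filter (fun a => pvGetKey a "districtName" == c)).map (fun a => pvGetKey a "word")) := by
  induction l generalizing d with
  | nil => rfl
  | cons a l ih =>
    rw [List.foldl_cons, ih, pvStepA_eq_modify]
    by_cases h : pvGetKey a "districtName" = c
    · simp [h, PySem.Dict.getD_modify_self, PySem.Set.update]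
    · simp [h, Ne.symm h, PySem.Dict.getD_modify]

theorem keys_foldl_stepA (l : List (List (String × String))) :
    (l.foldl pvStepA PySem.Dict.empty).keys
      = PySem.List.dedup (l.map (fun a => pvGetKey a "districtName")) := by
  rw [foldl_stepA_eq]
  rw [PySem.Dict.keys_foldl_modify_key]
  simp [PySem.Set.update, PySem.Set.ofList, PySem.List.dedup]

theorem nodup_keys_foldl_stepA (l : List (List (String × String))) :
    (l.foldl pvStepA PySem.Dict.empty).keys.Nodup := by
  rw [keys_foldl_stepA]; exact PySem.List.nodup_dedup _

-- ===== VERDICT (by name: the statement is the Claim_ definition above) =====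
theorem get_district_statistics_spec : Claim_equal_get_district_statistics := by
  intro attractions _ _
  unfold Spec_get_district_statistics get_district_statistics get_district_statistics_alt
  dsimp only
  rw [PySem.Dict.items_eq_map_keys _ (nodup_keys_foldl_stepA attractions) PySem.Set.empty]
  rw [keys_foldl_stepA, List.map_map]
  apply List.map_congr_left
  intro d _
  simp only [Function.comp]
  rw [getD_foldl_stepA]
  simp [PySem.Set.update, PySem.Set.ofList, PySem.Dict.getD_empty]
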